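-- pv_equiv track=rewrite | github.com/omarelansary/New_KG_Benchamark | kg_pattern_stats.py | build_ids
-- ===== SOURCE A (Python) =====
-- from typing import Dict, Iterable, List, Sequence, Set, Tuple
--
-- Triple = Tuple[str, str, str]
--
-- def build_ids(triples: Iterable[Triple]):
--     ent_to_id: Dict[str, int] = {}
--     rel_to_id: Dict[str, int] = {}
--     ents: List[str] = []
--     rels: List[str] = []
--
--     def get_ent(e: str) -> int:
--         if e in ent_to_id:
--             return ent_to_id[e]
--         i = len(ents)
--         ent_to_id[e] = i
--         ents.append(e)
--         return i
--
--     def get_rel(r: str) -> int: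
--         if r in rel_to_id:
--             return rel_to_id[r]
--         i = len(rels)
--         rel_to_id[r] = i
--         rels.append(r)
--         return i
--
--     id_triples: List[Tuple[int, int, int]] = []
--     for h, r, t in triples:
--         id_triples.append((get_ent(h), get_rel(r), get_ent(t)))
--     return id_triples, ents, rels, ent_to_id, rel_to_id
-- ===== SOURCE B (Python) =====
-- def build_ids(triples):
--     # Dedup-then-enumerate: order lists come from an ordered dedup of the
--     # flattened streams, ids from enumerate; no incremental get-or-insert.
--     triples = list(triples)
--     ents = list(dict.fromkeys(x for t in triples for x in (t[0], t[2])))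
--     rels = list(dict.fromkeys(t[1] for t in triples))
--     ent_to_id = {e: i for i, e in enumerate(ents)}
--     rel_to_id = {r: i for i, r in enumerate(rels)}
--     id_triples = [(ent_to_id[h], rel_to_id[r], ent_to_id[t]) for h, r, t in triples]
--     return id_triples, ents, rels, ent_to_id, rel_to_id
-- ===== Notes on version B (the rewrite author's own statement) =====
-- stated objective: idiomatic
-- what changed: A's single loop with get-or-insert helpers that assign ids while emitting is replaced by dedup-then-enumerate: the entity/relation order lists are dict.fromkeys dedups of the flattened streams, the id dicts come from enumerate, and the id-triples are a final comprehension over finished tables.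
import Mathlib
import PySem

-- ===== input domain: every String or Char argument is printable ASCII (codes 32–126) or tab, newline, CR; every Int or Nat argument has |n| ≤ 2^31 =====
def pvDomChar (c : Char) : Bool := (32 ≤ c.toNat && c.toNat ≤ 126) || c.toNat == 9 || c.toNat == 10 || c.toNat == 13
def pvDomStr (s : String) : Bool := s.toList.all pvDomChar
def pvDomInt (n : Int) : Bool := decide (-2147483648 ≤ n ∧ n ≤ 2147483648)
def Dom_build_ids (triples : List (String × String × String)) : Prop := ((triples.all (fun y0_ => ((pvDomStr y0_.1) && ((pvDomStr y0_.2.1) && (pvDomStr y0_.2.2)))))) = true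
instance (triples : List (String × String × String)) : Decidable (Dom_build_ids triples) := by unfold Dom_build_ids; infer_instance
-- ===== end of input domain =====

-- B replaces A's single get-or-insert loop by dedup-then-enumerate: the order lists are
-- ordered dedups of the flattened streams, the id dicts come from enumerate (objective: idiomatic).

-- ===== PORT A =====
-- get_ent / get_rel (identical helper bodies in A): look up, else assign id = current length
def getIdA (d : PySem.Dict String Int) (l : List String) (e : String) :
    Int × PySem.Dict String Int × List String :=
  if d.contains e then (d.getD e 0, d, l)
  else ((l.length : Int), d.insert e (l.length : Int), l ++ [e])

def stepA
    (st : PySem.Dict String Int × PySem.Dict String Int × List String × List String × List (Int × Int × Int))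
    (p : String × String × String) :
    PySem.Dict String Int × PySem.Dict String Int × List String × List String × List (Int × Int × Int) :=
  let (ih, de1, le1) := getIdA st.1 st.2.2.1 p.1
  let (ir, dr1, lr1) := getIdA st.2.1 st.2.2.2.1 p.2.1
  let (it, de2, le2) := getIdA de1 le1 p.2.2
  (de2, dr1, le2, lr1, st.2.2.2.2 ++ [(ih, ir, it)])

def build_ids (triples : List (String × String × String)) :
    (List (Int × Int × Int)) × List String × List String × (List (String × Int)) × (List (String × Int)) :=
  let st := triples.foldl stepA (PySem.Dict.empty, PySem.Dict.empty, [], [], [])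
  (st.2.2.2.2, st.2.2.1, st.2.2.2.1, st.1.items, st.2.1.items)

-- ===== PORT B =====
-- {e: i for i, e in enumerate(l)}
def dictOf (l : List String) : PySem.Dict String Int :=
  (PySem.List.enumerate l).foldl (fun d q => d.insert q.2 q.1) PySem.Dict.empty

def build_ids_alt (triples : List (String × String × String)) :
    (List (Int × Int × Int)) × List String × List String × (List (String × Int)) × (List (String × Int)) :=
  let ents := PySem.List.dedup (triples.flatMap (fun p => [p.1, p.2.2]))
  let rels := PySem.List.dedup (triples.map (fun p => p.2.1))
  let entD := dictOf ents
  let relD := dictOf rels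
  let ids := triples.map (fun p => (entD.getD p.1 0, relD.getD p.2.1 0, entD.getD p.2.2 0))
  (ids, ents, rels, entD.items, relD.items)

-- ===== PRECONDITION & SPEC =====
def Spec_build_ids (triples : List (String × String × String)) (out : (List (Int × Int × Int)) × List String × List String × (List (String × Int)) × (List (String × Int))) : Prop := out = build_ids_alt triples
instance (triples : List (String × String × String)) (out : (List (Int × Int × Int)) × List String × List String × (List (String × Int)) × (List (String × Int))) : Decidable (Spec_build_ids triples out) := by unfold Spec_build_ids; infer_instance

-- ===== CLAIM (what is proved, stated in full; the proofs are below) =====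
def Claim_equal_build_ids : Prop := ∀ (triples : List (String × String × String)), Dom_build_ids triples → Spec_build_ids triples (build_ids triples)

-- ===== LEMMAS AND PROOFS =====

-- proof-side register step: A's get-or-insert, state only
def regB (st : PySem.Dict String Int × List String) (e : String) :
    PySem.Dict String Int × List String :=
  if st.1.contains e then st
  else (st.1.insert e (st.2.length : Int), st.2 ++ [e])

-- A's helper, expressed through the register step: the registered state and the id stored there
lemma getIdA_eq (d : PySem.Dict String Int) (l : List String) (e : String) :
    getIdA d l e = (((regB (d, l) e).1.getD e 0 : Int), regB (d, l) e) := by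
  simp only [getIdA, regB]
  split_ifs with h
  · rfl
  · simp [PySem.Dict.getD_insert_self]

-- once a key is bound, regB never changes its binding
lemma regB_get?_mono (st : PySem.Dict String Int × List String) (x e : String) (i : Int)
    (h : st.1.get? e = some i) : (regB st x).1.get? e = some i := by
  unfold regB
  split_ifs with hc
  · exact h
  · rcases eq_or_ne e x with rfl | hne
    · rw [PySem.Dict.contains_eq_isSome_get?, h] at hc; simp at hc
    · rw [PySem.Dict.get?_insert_of_ne _ _ hne]; exact h

lemma regB_get?_self (st : PySem.Dict String Int × List String) (e : String) :
    (regB st e).1.get? e = some ((regB st e).1.getD e 0) := by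
  unfold regB
  split_ifs with hc
  · rw [PySem.Dict.contains_eq_isSome_get?] at hc
    obtain ⟨i, hi⟩ := Option.isSome_iff_exists.mp hc
    rw [hi, PySem.Dict.getD_of_get?_eq_some _ _ hi]
  · simp [PySem.Dict.get?_insert_self, PySem.Dict.getD_insert_self]

lemma foldl_ent_mono (ts : List (String × String × String))
    (s : PySem.Dict String Int × List String) (e : String) (i : Int)
    (h : s.1.get? e = some i) :
    (ts.foldl (fun s p => regB (regB s p.1) p.2.2) s).1.get? e = some i := by
  induction ts generalizing s with
  | nil => exact h
  | cons p rest ih =>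
      exact ih _ (regB_get?_mono _ _ _ _ (regB_get?_mono _ _ _ _ h))

lemma foldl_rel_mono (ts : List (String × String × String))
    (s : PySem.Dict String Int × List String) (e : String) (i : Int)
    (h : s.1.get? e = some i) :
    (ts.foldl (fun s p => regB s p.2.1) s).1.get? e = some i := by
  induction ts generalizing s with
  | nil => exact h
  | cons p rest ih => exact ih _ (regB_get?_mono _ _ _ _ h)

-- A's fold splits into two independent table folds, with each emitted id equal to the final-table lookup
lemma loop_split (ts : List (String × String × String))
    (e r : PySem.Dict String Int × List String) (acc : List (Int × Int × Int)) :
    ts.foldl stepA (e.1, r.1, e.2, r.2, acc) =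
      ((ts.foldl (fun s p => regB (regB s p.1) p.2.2) e).1,
       (ts.foldl (fun s p => regB s p.2.1) r).1,
       (ts.foldl (fun s p => regB (regB s p.1) p.2.2) e).2,
       (ts.foldl (fun s p => regB s p.2.1) r).2,
       acc ++ ts.map (fun p =>
         ((ts.foldl (fun s p => regB (regB s p.1) p.2.2) e).1.getD p.1 0,
          (ts.foldl (fun s p => regB s p.2.1) r).1.getD p.2.1 0,
          (ts.foldl (fun s p => regB (regB s p.1) p.2.2) e).1.getD p.2.2 0))) := by
  induction ts generalizing e r acc with
  | nil => simp
  | cons p rest ih =>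
      obtain ⟨de, le⟩ := e
      obtain ⟨dr, lr⟩ := r
      simp only [List.foldl_cons, stepA, getIdA_eq]
      rw [ih (regB (regB (de, le) p.1) p.2.2) (regB (dr, lr) p.2.1)]
      simp only [List.map_cons, List.append_assoc, List.singleton_append]
      have hh : (rest.foldl (fun s p => regB (regB s p.1) p.2.2)
            (regB (regB (de, le) p.1) p.2.2)).1.getD p.1 0
          = (regB (de, le) p.1).1.getD p.1 0 := by
        have h1 := regB_get?_self (de, le) p.1
        have h2 := regB_get?_mono (regB (de, le) p.1) p.2.2 p.1 _ h1
        have h3 := foldl_ent_mono rest _ p.1 _ h2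
        rw [PySem.Dict.getD_of_get?_eq_some _ _ h3]
      have ht : (rest.foldl (fun s p => regB (regB s p.1) p.2.2)
            (regB (regB (de, le) p.1) p.2.2)).1.getD p.2.2 0
          = (regB (regB (de, le) p.1) p.2.2).1.getD p.2.2 0 := by
        have h1 := regB_get?_self (regB (de, le) p.1) p.2.2
        have h3 := foldl_ent_mono rest _ p.2.2 _ h1
        rw [PySem.Dict.getD_of_get?_eq_some _ _ h3]
      have hr : (rest.foldl (fun s p => regB s p.2.1)
            (regB (dr, lr) p.2.1)).1.getD p.2.1 0
          = (regB (dr, lr) p.2.1).1.getD p.2.1 0 := by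
        have h1 := regB_get?_self (dr, lr) p.2.1
        have h3 := foldl_rel_mono rest _ p.2.1 _ h1
        rw [PySem.Dict.getD_of_get?_eq_some _ _ h3]
      rw [hh, ht, hr]

-- the entity fold over triples is the plain regB fold over the flattened stream
lemma foldl_ent_flatten (ts : List (String × String × String))
    (s : PySem.Dict String Int × List String) :
    ts.foldl (fun s p => regB (regB s p.1) p.2.2) s
      = (ts.flatMap (fun p => [p.1, p.2.2])).foldl regB s := by
  induction ts generalizing s with
  | nil => rfl
  | cons p rest ih => simp [List.flatMap_cons, ih]

-- dictOf of an extended list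
lemma dictOf_append_singleton (l : List String) (e : String) :
    dictOf (l ++ [e]) = (dictOf l).insert e (l.length : Int) := by
  simp [dictOf, PySem.List.enumerate_append, PySem.List.enumerate_cons]

lemma keys_dictOf (l : List String) : (dictOf l).keys = PySem.Set.ofList l := by
  unfold dictOf
  rw [PySem.Dict.keys_foldl_insert_key (key := fun q : Int × String => q.2)
        (f := fun d q => q.1)]
  simp [PySem.List.map_snd_enumerate, PySem.Set.update_nil_left, PySem.Dict.keys_empty]

lemma contains_dictOf (l : List String) (e : String) :
    (dictOf l).contains e = decide (e ∈ l) := by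
  rw [PySem.Dict.contains_eq_decide_mem_keys, keys_dictOf]
  simp [PySem.Set.mem_ofList]


-- one regB step on a dedup-synchronised state
lemma regB_dictOf (l : List String) (e : String) :
    regB (dictOf l, l) e = (dictOf (PySem.Set.add l e), PySem.Set.add l e) := by
  unfold regB PySem.Set.add
  rw [contains_dictOf l]
  by_cases h : e ∈ l
  · simp [h, PySem.Set.contains]
  · simp [h, PySem.Set.contains, dictOf_append_singleton]

lemma nodup_add (l : List String) (hl : l.Nodup) (e : String) :
    (PySem.Set.add l e).Nodup := by
  unfold PySem.Set.add
  split_ifs with h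
  · exact hl
  · simp only [PySem.Set.contains] at h
    simp only [List.contains_eq_mem, decide_eq_true_eq] at h
    simp only [List.nodup_append, List.nodup_singleton, true_and]
    exact ⟨hl, by simpa [List.disjoint_left] using fun a ha (hae : a = e) => h (hae ▸ ha)⟩

-- the regB fold tracks (dictOf, dedup) along the whole stream
lemma foldl_regB_eq (xs : List String) (l : List String) (hl : l.Nodup) :
    xs.foldl regB (dictOf l, l) = (dictOf (PySem.Set.update l xs), PySem.Set.update l xs) := by
  induction xs generalizing l with
  | nil => simp [PySem.Set.update]
  | cons x rest ih =>
      rw [List.foldl_cons, regB_dictOf l x]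
      rw [ih (PySem.Set.add l x) (nodup_add l hl x)]
      simp [PySem.Set.update]

lemma foldl_regB_from_empty (xs : List String) :
    xs.foldl regB (PySem.Dict.empty, []) = (dictOf (PySem.List.dedup xs), PySem.List.dedup xs) := by
  have h0 : (PySem.Dict.empty : PySem.Dict String Int) = dictOf [] := rfl
  rw [h0, foldl_regB_eq xs [] List.nodup_nil]
  simp [PySem.Set.update_nil_left]

-- ===== VERDICT (by name: the statement is the Claim_ definition above) =====
theorem build_ids_spec : Claim_equal_build_ids := by
  intro ts _
  show build_ids ts = build_ids_alt ts
  unfold build_ids build_ids_alt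
  have he : ts.foldl (fun s p => regB (regB s p.1) p.2.2) (PySem.Dict.empty, [])
      = (dictOf (PySem.List.dedup (ts.flatMap (fun p => [p.1, p.2.2]))),
         PySem.List.dedup (ts.flatMap (fun p => [p.1, p.2.2]))) := by
    rw [foldl_ent_flatten, foldl_regB_from_empty]
  have hr : ts.foldl (fun s p => regB s p.2.1) (PySem.Dict.empty, [])
      = (dictOf (PySem.List.dedup (ts.map (fun p => p.2.1))),
         PySem.List.dedup (ts.map (fun p => p.2.1))) := by
    rw [show (fun (s : PySem.Dict String Int × List String) (p : String × String × String) =>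
          regB s p.2.1) = (fun s p => regB s ((fun q : String × String × String => q.2.1) p))
        from rfl, ← List.foldl_map, foldl_regB_from_empty]
  have := loop_split ts (PySem.Dict.empty, []) (PySem.Dict.empty, []) []
  simp only at this
  rw [this, he, hr]
  simp
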